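-- pv_equiv track=rewrite | github.com/a-float/my_SFMLS | ASD/kol1.py | calc_prettines
-- ===== SOURCE A (Python) =====
-- def calc_prettines(a):
-- 	cp_a = a
-- 	c1 = [0]*10
-- 	while a > 0:
-- 		c1[a%10]+=1
-- 		a = a//10
-- 	poj = 0 #liczba cyfr jednokrotnych
-- 	wiel = 0 #liczba cyfr wielokrotnych
-- 	for i in c1:
-- 		if i == 1:poj+=1
-- 		elif i != 0: wiel+=1
-- 	return (wiel, 10-wiel-poj, cp_a)
-- ===== SOURCE B (Python) =====
-- def calc_prettines(a):
--     seen = set()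
--     multi = set()
--     n = a
--     while n > 0:
--         d = n % 10
--         if d in seen:
--             multi.add(d)
--         else:
--             seen.add(d)
--         n //= 10
--     return (len(multi), 10 - len(seen), a)
-- ===== Notes on version B (the rewrite author's own statement) =====
-- stated objective: simpler
-- what changed: Replaces A's fixed ten-slot occurrence array plus a second ten-element classification scan by a single pass that maintains two membership sets (seen, repeated): a digit already seen goes into the repeated set, so the answer is (len(repeated), ten minus len(seen), a) with no counts and no second pass.
import Mathlib
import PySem

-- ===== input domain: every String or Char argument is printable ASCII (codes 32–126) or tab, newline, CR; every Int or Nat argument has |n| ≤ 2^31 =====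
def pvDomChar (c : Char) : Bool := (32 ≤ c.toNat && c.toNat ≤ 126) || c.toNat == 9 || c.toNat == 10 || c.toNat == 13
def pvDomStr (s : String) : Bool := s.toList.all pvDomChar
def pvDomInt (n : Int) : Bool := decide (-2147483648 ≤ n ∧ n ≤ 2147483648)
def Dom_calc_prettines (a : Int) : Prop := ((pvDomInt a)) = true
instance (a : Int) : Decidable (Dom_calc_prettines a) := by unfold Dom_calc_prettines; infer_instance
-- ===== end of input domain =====

-- B replaces A's fixed ten-slot occurrence array and its second classification scan by a
-- single pass over the digits maintaining two membership sets (seen / repeated); the result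
-- is (len(repeated), 10 - len(seen), a). Objective: simpler (no count table, no second pass).

-- ===== PORT A =====
-- the 'while a > 0' loop: c1[a%10] += 1; a = a//10
def pvALoop (a : Int) (c1 : List Int) : List Int :=
  if _h : a > 0 then
    pvALoop (PySem.Int.floordiv a 10)
      (PySem.List.pySetD c1 (PySem.Int.mod a 10)
        (PySem.List.pyGetD c1 (PySem.Int.mod a 10) 0 + 1))
  else c1
termination_by a.toNat
decreasing_by
  rw [PySem.Int.floordiv_eq_ediv_of_pos (by norm_num : (0:Int) < 10)]
  omega

def calc_prettines (a : Int) : Int × Int × Int :=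
  let cp_a := a
  let c1 := pvALoop a (List.replicate 10 (0 : Int))
  let pw := c1.foldl
    (fun (pw : Int × Int) i =>
      if i == 1 then (pw.1 + 1, pw.2)
      else if i != 0 then (pw.1, pw.2 + 1)
      else pw) (0, 0)
  (pw.2, 10 - pw.2 - pw.1, cp_a)

-- ===== PORT B =====
-- the 'while n > 0' loop of Source B: d = n % 10; put d in multi if already seen, else in seen
def pvBLoop (n : Int) (seen multi : PySem.Set Int) : PySem.Set Int × PySem.Set Int :=
  if _h : n > 0 then
    if PySem.Set.contains seen (PySem.Int.mod n 10) then
      pvBLoop (PySem.Int.floordiv n 10) seen (PySem.Set.add multi (PySem.Int.mod n 10))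
    else
      pvBLoop (PySem.Int.floordiv n 10) (PySem.Set.add seen (PySem.Int.mod n 10)) multi
  else (seen, multi)
termination_by n.toNat
decreasing_by
  all_goals
    rw [PySem.Int.floordiv_eq_ediv_of_pos (by norm_num : (0:Int) < 10)]
    omega

def calc_prettines_alt (a : Int) : Int × Int × Int :=
  let r := pvBLoop a PySem.Set.empty PySem.Set.empty
  (PySem.Set.len r.2, 10 - PySem.Set.len r.1, a)

-- ===== PRECONDITION & SPEC =====
def Spec_calc_prettines (a : Int) (out : Int × Int × Int) : Prop := out = calc_prettines_alt a
instance (a : Int) (out : Int × Int × Int) : Decidable (Spec_calc_prettines a out) := by unfold Spec_calc_prettines; infer_instance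

-- ===== CLAIM (what is proved, stated in full; the proofs are below) =====
def Claim_equal_calc_prettines : Prop := ∀ (a : Int), Dom_calc_prettines a → Spec_calc_prettines a (calc_prettines a)

-- ===== LEMMAS AND PROOFS =====

-- proof-side helper: the digits of a, least-significant first (the sequence both loops visit)
def pvDigits (n : Int) : List Int :=
  if _h : n > 0 then PySem.Int.mod n 10 :: pvDigits (PySem.Int.floordiv n 10)
  else []
termination_by n.toNat
decreasing_by
  rw [PySem.Int.floordiv_eq_ediv_of_pos (by norm_num : (0:Int) < 10)]
  omega

-- every digit extracted is in [0, 10)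
theorem pvDigits_bounds (n : Int) : ∀ d ∈ pvDigits n, 0 ≤ d ∧ d < 10 := by
  induction n using pvDigits.induct with
  | case1 n h ih =>
    rw [pvDigits, dif_pos h]
    intro d hd
    rcases List.mem_cons.mp hd with rfl | hd
    · exact ⟨PySem.Int.mod_nonneg n (by norm_num), PySem.Int.mod_lt n (by norm_num)⟩
    · exact ih d hd
  | case2 n h =>
    rw [pvDigits, dif_neg h]; intro d hd; cases hd

-- A's while-loop is the counting fold over the digit list
theorem pvALoop_eq_foldl (a : Int) (c1 : List Int) :
    pvALoop a c1 = (pvDigits a).foldl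
      (fun c d => PySem.List.pySetD c d (PySem.List.pyGetD c d 0 + 1)) c1 := by
  induction a using pvDigits.induct generalizing c1 with
  | case1 a h ih =>
    rw [pvALoop, dif_pos h, pvDigits, dif_pos h, List.foldl_cons, ih]
  | case2 a h =>
    rw [pvALoop, dif_neg h, pvDigits, dif_neg h, List.foldl_nil]

-- the counting fold computes occurrence counts, read through pyGetD (default 0)
theorem foldl_count_getD (L : List Int) : ∀ (c : List Int),
    (∀ d ∈ L, 0 ≤ d ∧ d < (c.length : Int)) →
    (L.foldl (fun c d => PySem.List.pySetD c d (PySem.List.pyGetD c d 0 + 1)) c).length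
        = c.length ∧
    ∀ (j : Nat),
      PySem.List.pyGetD
        (L.foldl (fun c d => PySem.List.pySetD c d (PySem.List.pyGetD c d 0 + 1)) c)
        (j : Int) 0
      = PySem.List.pyGetD c (j : Int) 0 + (L.count (j : Int) : Int) := by
  induction L with
  | nil => intro c _; simp
  | cons d L ih =>
    intro c hb
    have hd := hb d (List.mem_cons_self)
    set c' := PySem.List.pySetD c d (PySem.List.pyGetD c d 0 + 1) with hc'
    have hlen' : c'.length = c.length := PySem.List.length_pySetD c d _
    have hb' : ∀ x ∈ L, 0 ≤ x ∧ x < (c'.length : Int) := by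
      intro x hx; rw [hlen']; exact hb x (List.mem_cons_of_mem _ hx)
    obtain ⟨ihlen, ihget⟩ := ih c' hb'
    rw [List.foldl_cons]
    refine ⟨by rw [ihlen, hlen'], ?_⟩
    intro j
    rw [ihget j]
    have hdn : d = ((d.toNat : Nat) : Int) := (Int.toNat_of_nonneg hd.1).symm
    have hdl : d.toNat < c.length := by omega
    have hget' : PySem.List.pyGetD c' (j : Int) 0
        = if j = d.toNat then PySem.List.pyGetD c ((d.toNat : Nat) : Int) 0 + 1
          else PySem.List.pyGetD c (j : Int) 0 := by
      rw [hc', hdn]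
      exact PySem.List.pyGetD_pySetD_natCast c d.toNat j _ 0 hdl
    rw [hget']
    by_cases hj : j = d.toNat
    · have hcj : ((j : Nat) : Int) = d := by omega
      rw [if_pos hj, hcj, ← hdn]
      have hcc : (d :: L).count d = L.count d + 1 := by
        simp
      rw [hcc]
      push_cast; ring
    · rw [if_neg hj]
      have hne : ((j : Nat) : Int) ≠ d := by omega
      have hne' : d ≠ ((j : Nat) : Int) := by omega
      have hcc : (d :: L).count ((j : Nat) : Int) = L.count ((j : Nat) : Int) := by
        simp [hne, hne']
      rw [hcc]

-- A's result array is the count table over range 10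
theorem pvALoop_eq_map (a : Int) :
    pvALoop a (List.replicate 10 (0 : Int))
      = (List.range 10).map (fun (j : Nat) => (((pvDigits a).count ((j : Int))) : Int)) := by
  set L := pvDigits a with hL
  have hb : ∀ d ∈ L, 0 ≤ d ∧ d < ((List.replicate 10 (0 : Int)).length : Int) := by
    intro d hd
    have := pvDigits_bounds a d hd
    simp only [List.length_replicate]
    exact ⟨this.1, by exact_mod_cast this.2⟩
  obtain ⟨hlen, hget⟩ := foldl_count_getD L (List.replicate 10 (0 : Int)) hb
  rw [pvALoop_eq_foldl]
  apply List.ext_getElem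
  · rw [hlen]; simp
  · intro j hj hj'
    have hj10 : j < 10 := by simpa using hj'
    have hgj := hget j
    have h1 : PySem.List.pyGetD
        (L.foldl (fun c d => PySem.List.pySetD c d (PySem.List.pyGetD c d 0 + 1))
          (List.replicate 10 (0 : Int))) (j : Int) 0
        = (L.foldl (fun c d => PySem.List.pySetD c d (PySem.List.pyGetD c d 0 + 1))
          (List.replicate 10 (0 : Int))).getD j 0 := PySem.List.pyGetD_natCast _ j 0
    have h2 : PySem.List.pyGetD (List.replicate 10 (0 : Int)) (j : Int) 0
        = (List.replicate 10 (0 : Int)).getD j 0 := PySem.List.pyGetD_natCast _ j 0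
    rw [h1, h2] at hgj
    have hrep : (List.replicate 10 (0 : Int)).getD j 0 = 0 := by
      interval_cases j <;> rfl
    rw [hrep] at hgj
    have hgetd : (L.foldl (fun c d => PySem.List.pySetD c d (PySem.List.pyGetD c d 0 + 1))
        (List.replicate 10 (0 : Int))).getD j 0
        = (L.foldl (fun c d => PySem.List.pySetD c d (PySem.List.pyGetD c d 0 + 1))
        (List.replicate 10 (0 : Int)))[j]'hj := by
      rw [List.getD_eq_getElem?_getD, List.getElem?_eq_getElem hj]; rfl
    rw [hgetd] at hgj
    rw [hgj]
    simp

-- A's classification scan over any list, with running accumulators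
theorem scan_foldl (cs : List Int) : ∀ (p w : Int),
    cs.foldl (fun (pw : Int × Int) i =>
      if i == 1 then (pw.1 + 1, pw.2)
      else if i != 0 then (pw.1, pw.2 + 1)
      else pw) (p, w)
    = (p + (cs.countP (fun i => i == 1) : Int),
       w + (cs.countP (fun i => !(i == 1) && !(i == 0)) : Int)) := by
  induction cs with
  | nil => intro p w; simp
  | cons c cs ih =>
    intro p w
    simp only [List.foldl_cons]
    by_cases h1 : c = 1
    · subst h1
      rw [if_pos (by decide), ih]
      have hq : List.countP (fun i => i == 1) ((1 : Int) :: cs)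
          = List.countP (fun i => i == 1) cs + 1 := by simp
      have hr : List.countP (fun i => !(i == 1) && !(i == 0)) ((1 : Int) :: cs)
          = List.countP (fun i => !(i == 1) && !(i == 0)) cs := by simp
      rw [hq, hr]
      refine Prod.ext ?_ rfl
      push_cast; ring
    · rw [if_neg (by simpa using h1)]
      by_cases h0 : c = 0
      · subst h0
        rw [if_neg (by decide), ih]
        have hq : List.countP (fun i => i == 1) ((0 : Int) :: cs)
            = List.countP (fun i => i == 1) cs := by simp
        have hr : List.countP (fun i => !(i == 1) && !(i == 0)) ((0 : Int) :: cs)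
            = List.countP (fun i => !(i == 1) && !(i == 0)) cs := by simp
        rw [hq, hr]
      · rw [if_pos (by simpa [bne] using h0), ih]
        have hq : List.countP (fun i => i == 1) (c :: cs)
            = List.countP (fun i => i == 1) cs := by simp [h1]
        have hr : List.countP (fun i => !(i == 1) && !(i == 0)) (c :: cs)
            = List.countP (fun i => !(i == 1) && !(i == 0)) cs + 1 := by
          simp [h1, h0]
        rw [hq, hr]
        refine Prod.ext rfl ?_
        push_cast; ring

-- generic: a countP splits along a disjoint boolean partition
theorem countP_split {α : Type} (l : List α) (p q r : α → Bool)
    (hpq : ∀ x ∈ l, p x = (q x || r x)) (hdis : ∀ x ∈ l, ¬(q x = true ∧ r x = true)) :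
    l.countP p = l.countP q + l.countP r := by
  induction l with
  | nil => simp
  | cons x l ih =>
    have hx := hpq x (List.mem_cons_self)
    have hdx := hdis x (List.mem_cons_self)
    rw [List.countP_cons, List.countP_cons, List.countP_cons,
      ih (fun y hy => hpq y (List.mem_cons_of_mem _ hy))
         (fun y hy => hdis y (List.mem_cons_of_mem _ hy))]
    rw [hx]
    cases hq : q x <;> cases hr : r x
    · simp
    · simp only [Bool.false_or, if_pos rfl, if_neg (by simp : ¬(false = true))]
      omega
    · simp only [Bool.true_or, if_pos rfl, if_neg (by simp : ¬(false = true))]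
      omega
    · exact absurd ⟨hq, hr⟩ hdx

-- a nodup list of digits in [0,10) has as many elements as range-10 slots it occupies
theorem nodup_len_eq (S : List Int) (hS : S.Nodup) (hb : ∀ x ∈ S, 0 ≤ x ∧ x < 10) :
    S.length = (List.range 10).countP (fun j => decide (((j : Nat) : Int) ∈ S)) := by
  have hperm : S.Perm
      (((List.range 10).filter (fun j => decide (((j : Nat) : Int) ∈ S))).map
        (fun j => ((j : Nat) : Int))) := by
    rw [List.perm_ext_iff_of_nodup]
    · intro y
      constructor
      · intro hy
        have hby := hb y hy
        refine List.mem_map.mpr ⟨y.toNat, ?_, Int.toNat_of_nonneg hby.1⟩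
        rw [List.mem_filter, List.mem_range]
        refine ⟨by omega, by rw [Int.toNat_of_nonneg hby.1]; simpa using hy⟩
      · intro hy
        obtain ⟨j, hj, rfl⟩ := List.mem_map.mp hy
        rw [List.mem_filter] at hj
        simpa using hj.2
    · exact hS
    · refine List.Nodup.map ?_ (List.Nodup.filter _ List.nodup_range)
      intro x y h
      have h' : ((x : Nat) : Int) = ((y : Nat) : Int) := h
      exact_mod_cast h'
  have hlen := hperm.length_eq
  rw [List.length_map, ← List.countP_eq_length_filter] at hlen
  exact hlen

-- the step Source B's loop performs on the pair (seen, multi)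
def pvStep (p : PySem.Set Int × PySem.Set Int) (d : Int) : PySem.Set Int × PySem.Set Int :=
  if PySem.Set.contains p.1 d then (p.1, PySem.Set.add p.2 d)
  else (PySem.Set.add p.1 d, p.2)

-- B's while-loop is the fold of pvStep over the digit list
theorem pvBLoop_eq_foldl (n : Int) (s m : PySem.Set Int) :
    pvBLoop n s m = (pvDigits n).foldl pvStep (s, m) := by
  induction n using pvDigits.induct generalizing s m with
  | case1 n h ih =>
    rw [pvBLoop, dif_pos h, pvDigits, dif_pos h, List.foldl_cons]
    by_cases hc : PySem.Set.contains s (PySem.Int.mod n 10)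
    · rw [if_pos hc, ih]
      congr 1
      simp only [pvStep]
      rw [if_pos hc]
    · rw [if_neg hc, ih]
      congr 1
      simp only [pvStep]
      rw [if_neg hc]
  | case2 n h =>
    rw [pvBLoop, dif_neg h, pvDigits, dif_neg h, List.foldl_nil]

-- invariant: after processing P, seen holds the digits of P and multi the repeated ones
theorem pvStep_invariant (L : List Int) : ∀ (P : List Int) (s m : PySem.Set Int),
    s.Nodup → m.Nodup → (∀ x, x ∈ s ↔ x ∈ P) → (∀ x, x ∈ m ↔ 2 ≤ P.count x) →
    (L.foldl pvStep (s, m)).1.Nodup ∧ (L.foldl pvStep (s, m)).2.Nodup ∧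
    (∀ x, x ∈ (L.foldl pvStep (s, m)).1 ↔ x ∈ P ++ L) ∧
    (∀ x, x ∈ (L.foldl pvStep (s, m)).2 ↔ 2 ≤ (P ++ L).count x) := by
  induction L with
  | nil =>
    intro P s m hs hm hms hmm
    simp only [List.foldl_nil, List.append_nil]
    exact ⟨hs, hm, hms, hmm⟩
  | cons d L ih =>
    intro P s m hs hm hms hmm
    rw [List.foldl_cons]
    have hPd : P ++ d :: L = (P ++ [d]) ++ L := by simp
    rw [hPd]
    by_cases hc : PySem.Set.contains s d
    · have hds : d ∈ s := by simpa using hc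
      have hdP : d ∈ P := (hms d).mp hds
      have hstep : pvStep (s, m) d = (s, PySem.Set.add m d) := by
        simp only [pvStep]
        rw [if_pos hc]
      rw [hstep]
      refine ih (P ++ [d]) s (PySem.Set.add m d) hs (PySem.Set.nodup_add _ _ hm) ?_ ?_
      · intro x
        rw [hms x, List.mem_append, List.mem_singleton]
        constructor
        · intro h
          exact Or.inl h
        · intro h
          rcases h with h | h
          · exact h
          · rw [h]; exact hdP
      · intro x
        rw [PySem.Set.mem_add, hmm x, List.count_append]
        by_cases hx : x = d
        · have hone : List.count x [d] = 1 := by rw [hx]; simp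
          have h1 : 1 ≤ P.count x := by rw [hx]; exact List.count_pos_iff.mpr hdP
          rw [hone]
          constructor
          · intro _; omega
          · intro _; exact Or.inr hx
        · have hzero : ([d] : List Int).count x = 0 := by
            rw [List.count_eq_zero]; simp [hx]
          rw [hzero]
          constructor
          · intro h
            rcases h with h | h
            · omega
            · exact absurd h hx
          · intro h
            exact Or.inl (by omega)
    · have hds : d ∉ s := by simpa using hc
      have hdP : d ∉ P := fun h => hds ((hms d).mpr h)
      have hstep : pvStep (s, m) d = (PySem.Set.add s d, m) := by
        simp only [pvStep]
        rw [if_neg hc]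
      rw [hstep]
      refine ih (P ++ [d]) (PySem.Set.add s d) m (PySem.Set.nodup_add _ _ hs) hm ?_ ?_
      · intro x
        rw [PySem.Set.mem_add, hms x, List.mem_append, List.mem_singleton]
      · intro x
        rw [hmm x, List.count_append]
        by_cases hx : x = d
        · have hone : List.count x [d] = 1 := by rw [hx]; simp
          have h0 : P.count x = 0 := by rw [hx]; exact List.count_eq_zero.mpr hdP
          rw [hone, h0]
          omega
        · have hzero : ([d] : List Int).count x = 0 := by
            rw [List.count_eq_zero]; simp [hx]
          rw [hzero]
          omega

-- ===== VERDICT (by name: the statement is the Claim_ definition above) =====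
theorem calc_prettines_spec : Claim_equal_calc_prettines := by
  intro a _
  unfold Spec_calc_prettines calc_prettines calc_prettines_alt
  simp only []
  set L := pvDigits a with hL
  have hb : ∀ d ∈ L, 0 ≤ d ∧ d < 10 := pvDigits_bounds a
  -- A side: count table + classification scan
  rw [pvALoop_eq_map, scan_foldl]
  -- B side: the invariant instantiated at the empty sets
  have hinv := pvStep_invariant L [] PySem.Set.empty PySem.Set.empty
    List.nodup_nil List.nodup_nil (by intro x; simp [PySem.Set.empty])
    (by intro x; simp [PySem.Set.empty])
  rw [List.nil_append] at hinv
  obtain ⟨hsN, hmN, hsMem, hmMem⟩ := hinv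
  rw [pvBLoop_eq_foldl]
  set r := L.foldl pvStep (PySem.Set.empty, PySem.Set.empty) with hr
  -- lengths of the two sets, measured over range 10
  have hbs : ∀ x ∈ r.1, 0 ≤ x ∧ x < 10 := fun x hx => hb x ((hsMem x).mp hx)
  have hbm : ∀ x ∈ r.2, 0 ≤ x ∧ x < 10 := by
    intro x hx
    have h2 := (hmMem x).mp hx
    have : x ∈ L := List.count_pos_iff.mp (by omega)
    exact hb x this
  have hlenS := nodup_len_eq r.1 hsN hbs
  have hlenM := nodup_len_eq r.2 hmN hbm
  have hcongrS : (List.range 10).countP (fun j => decide (((j : Nat) : Int) ∈ r.1))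
      = (List.range 10).countP (fun j => decide (1 ≤ L.count ((j : Nat) : Int))) := by
    apply List.countP_congr
    intro j _
    simp only [decide_eq_true_eq]
    rw [hsMem]
    exact ⟨fun h => List.count_pos_iff.mpr h, fun h => List.count_pos_iff.mp (by omega)⟩
  have hcongrM : (List.range 10).countP (fun j => decide (((j : Nat) : Int) ∈ r.2))
      = (List.range 10).countP (fun j => decide (2 ≤ L.count ((j : Nat) : Int))) := by
    apply List.countP_congr
    intro j _
    simp only [decide_eq_true_eq]
    exact hmMem _
  -- A's two scan counts rewritten over range 10 on Nat counts
  have hA1 : List.countP (fun i => i == 1)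
      ((List.range 10).map (fun (j : Nat) => ((L.count ((j : Int))) : Int)))
      = (List.range 10).countP (fun j => decide (L.count ((j : Nat) : Int) = 1)) := by
    rw [List.countP_map]
    apply List.countP_congr
    intro j _
    by_cases h : L.count ((j : Nat) : Int) = 1
    · simp [Function.comp, h]
    · have h' : ((L.count ((j : Nat) : Int) : Nat) : Int) ≠ 1 := by exact_mod_cast h
      simp [Function.comp, h, h']
  have hA2 : List.countP (fun i => !(i == 1) && !(i == 0))
      ((List.range 10).map (fun (j : Nat) => ((L.count ((j : Int))) : Int)))
      = (List.range 10).countP (fun j => decide (2 ≤ L.count ((j : Nat) : Int))) := by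
    rw [List.countP_map]
    apply List.countP_congr
    intro j _
    by_cases h2 : 2 ≤ L.count ((j : Nat) : Int)
    · have hn1 : L.count ((j : Nat) : Int) ≠ 1 := by omega
      have hn0 : L.count ((j : Nat) : Int) ≠ 0 := by omega
      simp [Function.comp, hn1, hn0, h2]
    · have : L.count ((j : Nat) : Int) = 0 ∨ L.count ((j : Nat) : Int) = 1 := by omega
      rcases this with h | h <;> simp [Function.comp, h, h2]
  -- membership count splits into singletons and repeats
  have hsplit : (List.range 10).countP (fun j => decide (1 ≤ L.count ((j : Nat) : Int)))
      = (List.range 10).countP (fun j => decide (L.count ((j : Nat) : Int) = 1))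
        + (List.range 10).countP (fun j => decide (2 ≤ L.count ((j : Nat) : Int))) := by
    apply countP_split
    · intro j _
      by_cases h1 : L.count ((j : Nat) : Int) = 1
      · simp [h1]
      · by_cases h2 : 2 ≤ L.count ((j : Nat) : Int)
        · have hge : 1 ≤ L.count ((j : Nat) : Int) := by omega
          simp [h1, h2, hge]
        · have h0 : L.count ((j : Nat) : Int) = 0 := by omega
          simp [h0]
    · intro j _
      rintro ⟨h1, h2⟩
      simp at h1 h2
      omega
  have hlenS' : PySem.Set.len r.1
      = ((List.range 10).countP (fun j => decide (L.count ((j : Nat) : Int) = 1)) : Int)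
        + ((List.range 10).countP (fun j => decide (2 ≤ L.count ((j : Nat) : Int))) : Int) := by
    show ((r.1.length : Nat) : Int) = _
    rw [hlenS, hcongrS, hsplit]
    push_cast; ring
  have hlenM' : PySem.Set.len r.2
      = ((List.range 10).countP (fun j => decide (2 ≤ L.count ((j : Nat) : Int))) : Int) := by
    show ((r.2.length : Nat) : Int) = _
    rw [hlenM, hcongrM]
  rw [hA1, hA2, hlenS', hlenM']
  refine Prod.ext (by push_cast; ring) (Prod.ext (by push_cast; ring) rfl)
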